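-- pv_equiv track=rewrite | github.com/damonallison/python-examples | edu/harvard/cs50/week6/sentimental-readability/readability.py | grade_level
-- ===== SOURCE A (Python) =====
-- def grade_level(text: str) -> tuple[int, int, int]:
--     """Computes the estimated grade level of `text`. using the Coleman-Liau
--     index.
--
--     grade level = 0.0588 * L - 0.296 * S - 15.8
--
--     * L = average number of letters per 100 words
--     * S = average number of sentences per 100 words
--
--     Your program should count the number of letters, words, and sentences in the
--     text.
--
--     * A letter is any upper case or lower case.
--     * Any sequence of characters separated by spaces should count as a word.
--     * Any occurrence of a period, exclamation point, or question mark indicates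
--       the end of a sentence.
--     """
--
--     letters = 0
--     words = 0
--     sentences = 0
--
--     for char in text:
--         if char in [".", "?", "!"]:
--             sentences += 1
--         elif char.isspace():
--             words += 1
--         elif char.isalpha():
--             letters += 1
--
--     # hack: add one for the last word
--     words += 1
--     return (letters, words, sentences)
-- ===== SOURCE B (Python) =====
-- def grade_level(text: str) -> tuple[int, int, int]:
--     """Histogram-based re-implementation: one pass builds a character
--     frequency table, then the three totals are summed over the distinct
--     characters weighted by their counts."""
--     freq = {}
--     for ch in text:
--         freq[ch] = freq.get(ch, 0) + 1
--     letters = sum(n for c, n in freq.items() if c.isalpha())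
--     whitespace = sum(n for c, n in freq.items() if c.isspace())
--     sentences = sum(n for c, n in freq.items() if c in ".?!")
--     return (letters, whitespace + 1, sentences)
-- ===== Notes on version B (the rewrite author's own statement) =====
-- stated objective: alternative
-- what changed: Replaces the per-character three-way elif loop with a character-frequency histogram built in one pass, the three totals then being sums of counts over the distinct characters classified once each.
import Mathlib
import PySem

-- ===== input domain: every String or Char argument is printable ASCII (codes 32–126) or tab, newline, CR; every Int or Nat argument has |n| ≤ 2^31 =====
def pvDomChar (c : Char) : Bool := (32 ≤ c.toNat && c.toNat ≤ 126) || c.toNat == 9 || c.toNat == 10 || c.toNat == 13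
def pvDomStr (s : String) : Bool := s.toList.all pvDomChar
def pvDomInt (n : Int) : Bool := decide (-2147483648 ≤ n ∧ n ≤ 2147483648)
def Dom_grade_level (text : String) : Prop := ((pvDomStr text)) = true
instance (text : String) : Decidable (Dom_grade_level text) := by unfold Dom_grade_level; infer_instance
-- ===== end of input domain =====

-- B replaces A's per-character elif loop by a frequency histogram summed over distinct characters (alternative decomposition, same totals).

-- ===== PORT A =====
def grade_level (text : String) : Int × Int × Int :=
  let st := text.toList.foldl
    (fun (acc : Int × Int × Int) c =>
      if c ∈ ['.', '?', '!'] then (acc.1, acc.2.1, acc.2.2 + 1)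
      else if PySem.Chars.isspace c then (acc.1, acc.2.1 + 1, acc.2.2)
      else if PySem.Chars.isalpha c then (acc.1 + 1, acc.2.1, acc.2.2)
      else acc) (0, 0, 0)
  (st.1, st.2.1 + 1, st.2.2)

-- ===== PORT B =====
def grade_level_alt (text : String) : Int × Int × Int :=
  let freq : PySem.Dict Char Int :=
    text.toList.foldl (fun d c => d.insert c (d.getD c 0 + 1)) PySem.Dict.empty
  let letters := ((freq.items.filter (fun p => PySem.Chars.isalpha p.1)).map (fun p => p.2)).sum
  let whitespace := ((freq.items.filter (fun p => PySem.Chars.isspace p.1)).map (fun p => p.2)).sum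
  let sentences := ((freq.items.filter (fun p => p.1 ∈ ['.', '?', '!'])).map (fun p => p.2)).sum
  (letters, whitespace + 1, sentences)

-- ===== PRECONDITION & SPEC =====
def Spec_grade_level (text : String) (out : Int × Int × Int) : Prop := out = grade_level_alt text
instance (text : String) (out : Int × Int × Int) : Decidable (Spec_grade_level text out) := by unfold Spec_grade_level; infer_instance

-- ===== CLAIM (what is proved, stated in full; the proofs are below) =====
def Claim_equal_grade_level : Prop := ∀ (text : String), Dom_grade_level text → Spec_grade_level text (grade_level text)

-- ===== LEMMAS AND PROOFS =====

theorem alpha_bounds (c : Char) (h : PySem.Chars.isalpha c = true) :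
    (65 ≤ c.toNat ∧ c.toNat ≤ 90) ∨ (97 ≤ c.toNat ∧ c.toNat ≤ 122) := by
  simp only [PySem.Chars.isalpha, PySem.Chars.isupper, PySem.Chars.islower,
    Bool.or_eq_true, Bool.and_eq_true, decide_eq_true_eq, Char.le_def] at h
  rcases h with ⟨h1, h2⟩ | ⟨h1, h2⟩
  · left; exact ⟨UInt32.le_iff_toNat_le.mp h1, UInt32.le_iff_toNat_le.mp h2⟩
  · right; exact ⟨UInt32.le_iff_toNat_le.mp h1, UInt32.le_iff_toNat_le.mp h2⟩

theorem alpha_not_space (c : Char) (h : PySem.Chars.isalpha c = true) :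
    PySem.Chars.isspace c = false := by
  have := alpha_bounds c h
  simp only [PySem.Chars.isspace, Bool.or_eq_false_iff, Bool.and_eq_false_iff,
    decide_eq_false_iff_not]
  omega

theorem alpha_not_punct (c : Char) (h : PySem.Chars.isalpha c = true) :
    c ∉ (['.', '?', '!'] : List Char) := by
  have := alpha_bounds c h
  intro hc
  fin_cases hc <;> simp [Char.toNat] at this

theorem punct_not_space (c : Char) (h : c ∈ (['.', '?', '!'] : List Char)) :
    PySem.Chars.isspace c = false := by
  fin_cases h <;> decide

-- indicator sum: over a nodup key list, the indicator of x sums to [p x] when x ∈ ks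
theorem indicator_sum (p : Char → Bool) (x : Char) :
    ∀ ks : List Char, ks.Nodup → x ∈ ks →
    ((ks.filter p).map (fun c => if c = x then (1 : Int) else 0)).sum
      = if p x then (1 : Int) else 0 := by
  intro ks
  induction ks with
  | nil => intro _ h; cases h
  | cons k ks ih =>
    intro hnd hmem
    have hnd' := hnd.of_cons
    rcases List.mem_cons.mp hmem with rfl | hx
    · have hxk : x ∉ ks := (List.nodup_cons.mp hnd).1
      have hz : ((ks.filter p).map (fun c => if c = x then (1 : Int) else 0)).sum = 0 := by
        apply List.sum_eq_zero
        intro v hv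
        simp only [List.mem_map, List.mem_filter] at hv
        obtain ⟨c, ⟨hc, _⟩, rfl⟩ := hv
        have : c ≠ x := fun h => hxk (h ▸ hc)
        simp [this]
      by_cases hp : p x
      · simp [hp, hz]
      · simp [hp, hz]
    · have hkx : k ≠ x := fun h => (List.nodup_cons.mp hnd).1 (h ▸ hx)
      by_cases hp : p k
      · simp [hp, hkx, ih hnd' hx]
      · simp [hp, ih hnd' hx]

-- core: summing counts over the distinct keys that satisfy p is countP p
theorem key_sum (p : Char → Bool) :
    ∀ (xs ks : List Char), ks.Nodup → (∀ c ∈ xs, c ∈ ks) →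
    ((ks.filter p).map (fun c => (xs.count c : Int))).sum = (xs.countP p : Int) := by
  intro xs
  induction xs with
  | nil =>
    intro ks _ _
    simp
  | cons x xs ih =>
    intro ks hnd hsub
    have hsub' : ∀ c ∈ xs, c ∈ ks := fun c hc => hsub c (List.mem_cons_of_mem x hc)
    have hx : x ∈ ks := hsub x (List.mem_cons_self)
    have hsplit : ∀ c : Char, ((x :: xs).count c : Int)
        = (xs.count c : Int) + (if c = x then (1 : Int) else 0) := by
      intro c
      by_cases hcx : c = x
      · simp [hcx]
      · simp [hcx, Ne.symm hcx]
    calc ((ks.filter p).map (fun c => ((x :: xs).count c : Int))).sum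
        = ((ks.filter p).map (fun c =>
            (xs.count c : Int) + (if c = x then (1 : Int) else 0))).sum := by
          congr 1; exact List.map_congr_left (fun c _ => hsplit c)
      _ = ((ks.filter p).map (fun c => (xs.count c : Int))).sum
            + ((ks.filter p).map (fun c => if c = x then (1 : Int) else 0)).sum := by
          rw [← List.sum_map_add]
      _ = (xs.countP p : Int) + (if p x then (1 : Int) else 0) := by
          rw [ih ks hnd hsub', indicator_sum p x ks hnd hx]
      _ = ((x :: xs).countP p : Int) := by
          by_cases hp : p x <;> simp [hp]

-- A's fold accumulates the three countP totals
theorem foldA_eq (xs : List Char) :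
    ∀ acc : Int × Int × Int,
    xs.foldl
      (fun (acc : Int × Int × Int) c =>
        if c ∈ ['.', '?', '!'] then (acc.1, acc.2.1, acc.2.2 + 1)
        else if PySem.Chars.isspace c then (acc.1, acc.2.1 + 1, acc.2.2)
        else if PySem.Chars.isalpha c then (acc.1 + 1, acc.2.1, acc.2.2)
        else acc) acc
    = (acc.1 + (xs.countP PySem.Chars.isalpha : Int),
       acc.2.1 + (xs.countP PySem.Chars.isspace : Int),
       acc.2.2 + (xs.countP (fun c => decide (c ∈ ['.', '?', '!'])) : Int)) := by
  induction xs with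
  | nil => intro acc; simp
  | cons x xs ih =>
    intro acc
    by_cases hpu : x ∈ (['.', '?', '!'] : List Char)
    · have hsp := punct_not_space x hpu
      have hal : PySem.Chars.isalpha x = false := by
        by_contra h
        exact alpha_not_punct x (by simpa using h) hpu
      simp only [List.foldl_cons, ih, List.countP_cons, hsp, hal, hpu]
      simp; ring_nf
    · by_cases hsp : PySem.Chars.isspace x
      · have hal : PySem.Chars.isalpha x = false := by
          by_contra h
          rw [alpha_not_space x (by simpa using h)] at hsp; exact absurd hsp (by simp)
        simp only [List.foldl_cons, ih, List.countP_cons, hsp, hal, hpu]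
        simp; ring_nf
      · by_cases hal : PySem.Chars.isalpha x
        · simp only [List.foldl_cons, ih, List.countP_cons, hal]
          simp [hpu, hsp]; ring_nf
        · simp only [List.foldl_cons, if_neg hpu, if_neg hsp, if_neg hal, ih, List.countP_cons]
          simp [hpu]

-- B's three sums are the three countP totals
theorem sumB_eq (xs : List Char) (p : Char → Bool) :
    ((((PySem.Dict.counter xs).items.filter (fun q => p q.1)).map (fun q => q.2)).sum : Int)
      = (xs.countP p : Int) := by
  rw [PySem.Dict.items_counter]
  rw [List.filter_map, List.map_map]
  exact key_sum p xs (PySem.Set.ofList xs) (PySem.Set.nodup_ofList xs)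
    (fun c hc => (PySem.Set.mem_ofList xs c).mpr hc)

-- ===== VERDICT (by name: the statement is the Claim_ definition above) =====
theorem grade_level_spec : Claim_equal_grade_level := by
  intro text _
  unfold Spec_grade_level grade_level grade_level_alt
  simp only [PySem.Dict.foldl_insert_getD_add_one_eq_counter, foldA_eq, sumB_eq]
  simp
  exact (sumB_eq text.toList (fun c => decide (c = '.') || (decide (c = '?') || decide (c = '!')))).symm
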